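-- pv_equiv track=rewrite | github.com/Deep-Learning-Profiling-Tools/tensor-viz | tools/sync-linear-layout-examples.py | viewer_axis_labels
-- ===== SOURCE A (Python) =====
-- def viewer_axis_labels(names: list[str]) -> list[str]:
--     """Convert dim names into viewer-safe axis labels."""
--
--     counts: dict[str, int] = {}
--     labels: list[str] = []
--     for name in names:
--         base = next((char.upper() for char in name if char.isalpha()), "A")
--         index = counts.get(base, 0)
--         counts[base] = index + 1
--         labels.append(base if index == 0 else f"{base}{index}")
--     return labels
-- ===== SOURCE B (Python) =====
-- def viewer_axis_labels(names: list[str]) -> list[str]: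
--     """Convert dim names into viewer-safe axis labels."""
--
--     bases = [next((c.upper() for c in name if c.isalpha()), "A") for name in names]
--     remaining: dict[str, int] = {}
--     for b in bases:
--         remaining[b] = remaining.get(b, 0) + 1
--     out: list[str] = []
--     for b in reversed(bases):
--         remaining[b] -= 1
--         k = remaining[b]
--         out.append(b if k == 0 else f"{b}{k}")
--     out.reverse()
--     return out
-- ===== Notes on version B (the rewrite author's own statement) =====
-- stated objective: alternative
-- what changed: Replaces A's single forward pass with a running seen-so-far counter by a two-phase scheme: first tally the TOTAL count of every base, then traverse the bases in REVERSE, decrementing the remaining count (which after the decrement equals the number of earlier occurrences) and building the label list back-to-front, reversing it at the end.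
import Mathlib
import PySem

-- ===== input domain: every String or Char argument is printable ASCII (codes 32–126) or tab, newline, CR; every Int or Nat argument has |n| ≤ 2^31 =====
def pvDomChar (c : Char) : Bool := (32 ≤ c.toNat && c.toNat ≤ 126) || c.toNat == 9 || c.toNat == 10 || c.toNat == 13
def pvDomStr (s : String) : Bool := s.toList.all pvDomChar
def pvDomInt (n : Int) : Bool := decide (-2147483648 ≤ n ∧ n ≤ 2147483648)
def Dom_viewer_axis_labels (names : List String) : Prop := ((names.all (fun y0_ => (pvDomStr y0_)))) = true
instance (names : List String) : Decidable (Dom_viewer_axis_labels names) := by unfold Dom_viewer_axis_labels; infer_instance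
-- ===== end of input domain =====

-- B replaces A's forward pass with a running seen-so-far counter by two phases: tally total
-- counts of every base, then traverse the bases in reverse decrementing the remaining counts
-- (the remainder after the decrement = number of earlier occurrences), building the label
-- list back-to-front and reversing at the end. Objective: alternative; same O(n) cost.

-- shared helper: `next((char.upper() for char in name if char.isalpha()), "A")`
-- (PySem.Chars.isalpha / upperChar are exact on the ASCII domain)
def pvBase (name : String) : String :=
  match name.toList.find? PySem.Chars.isalpha with
  | some c => String.ofList [PySem.Chars.upperChar c]
  | none => "A"

-- ===== PORT A =====
def pvStepA (st : PySem.Dict String Int × List String) (name : String) :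
    PySem.Dict String Int × List String :=
  let base := pvBase name
  let index := st.1.getD base 0
  (st.1.insert base (index + 1),
   st.2 ++ [if index = 0 then base else base ++ PySem.Int.toStr index])

def viewer_axis_labels (names : List String) : List String :=
  (names.foldl pvStepA (PySem.Dict.empty, [])).2

-- ===== PORT B =====
-- `remaining[b] -= 1`: the key is always present here (remaining was tallied from the same
-- bases list), so getD with default 0 is exact on every reachable state.
def pvStepB (st : PySem.Dict String Int × List String) (b : String) :
    PySem.Dict String Int × List String :=
  let d := st.1.insert b (st.1.getD b 0 - 1)
  let k := d.getD b 0
  (d, st.2 ++ [if k = 0 then b else b ++ PySem.Int.toStr k])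

def viewer_axis_labels_alt (names : List String) : List String :=
  let bases := names.map pvBase
  let remaining := bases.foldl (fun d b => d.insert b (d.getD b 0 + 1)) PySem.Dict.empty
  let res := bases.reverse.foldl pvStepB (remaining, [])
  res.2.reverse

-- ===== PRECONDITION & SPEC =====
def Spec_viewer_axis_labels (names : List String) (out : List String) : Prop := out = viewer_axis_labels_alt names
instance (names : List String) (out : List String) : Decidable (Spec_viewer_axis_labels names out) := by unfold Spec_viewer_axis_labels; infer_instance

-- ===== CLAIM (what is proved, stated in full; the proofs are below) =====
def Claim_equal_viewer_axis_labels : Prop := ∀ (names : List String), Dom_viewer_axis_labels names → Spec_viewer_axis_labels names (viewer_axis_labels names)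

-- ===== LEMMAS AND PROOFS =====

-- common characterisation: label each base by its number of occurrences in the prefix
def pvSpecLab (pre : List String) : List String → List String
  | [] => []
  | b :: t =>
      (if pre.count b = 0 then b else b ++ PySem.Int.toStr (pre.count b : Int))
        :: pvSpecLab (pre ++ [b]) t

lemma pvA_inv (l : List String) : ∀ (d : PySem.Dict String Int) (acc pre : List String),
    (∀ x, d.getD x 0 = (pre.count x : Int)) →
    (l.foldl pvStepA (d, acc)).2 = acc ++ pvSpecLab pre (l.map pvBase) := by
  induction l with
  | nil => intro d acc pre _; simp [pvSpecLab]
  | cons n t ih =>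
    intro d acc pre h
    have hb := h (pvBase n)
    simp only [List.foldl_cons, List.map_cons, pvSpecLab, pvStepA, hb]
    rw [ih _ _ (pre ++ [pvBase n])]
    · rw [List.append_assoc]
      by_cases h0 : pre.count (pvBase n) = 0 <;> simp [h0]
    · intro x
      rw [PySem.Dict.getD_insert, h x]
      by_cases hx : x = pvBase n
      · subst hx; simp [List.count_append]
      · have h1 : List.count x [pvBase n] = 0 := by
          rw [List.count_eq_zero]; simp [hx]
        simp [hx, List.count_append, h1]

-- B's reverse pass, as a foldr: after consuming the suffix, the dict holds the prefix
-- counts and the accumulator holds the suffix's labels reversed.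
lemma pvStepB_eq (st : PySem.Dict String Int × List String) (b : String) :
    pvStepB st b = (st.1.insert b (st.1.getD b 0 - 1),
      st.2 ++ [if st.1.getD b 0 - 1 = 0 then b
               else b ++ PySem.Int.toStr (st.1.getD b 0 - 1)]) := by
  simp [pvStepB, PySem.Dict.getD_insert_self]

lemma pvB_inv (suf : List String) : ∀ (pre : List String) (d : PySem.Dict String Int)
    (acc : List String), (∀ x, d.getD x 0 = ((pre ++ suf).count x : Int)) →
    (∀ x, (suf.foldr (fun b st => pvStepB st b) (d, acc)).1.getD x 0 = (pre.count x : Int)) ∧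
    (suf.foldr (fun b st => pvStepB st b) (d, acc)).2 = acc ++ (pvSpecLab pre suf).reverse := by
  induction suf with
  | nil => intro pre d acc h; simpa [pvSpecLab] using h
  | cons b t ih =>
    intro pre d acc h
    have h' : ∀ x, d.getD x 0 = (((pre ++ [b]) ++ t).count x : Int) := by
      intro x; rw [h x]; simp [List.count_append]
    obtain ⟨hd, hacc⟩ := ih (pre ++ [b]) d acc h'
    rw [List.foldr_cons]
    generalize hR : List.foldr (fun b st => pvStepB st b) (d, acc) t = r at hd hacc
    have hb : r.1.getD b 0 = (pre.count b : Int) + 1 := by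
      rw [hd b]; simp [List.count_append]
    rw [pvStepB_eq, hb]
    simp only [add_sub_cancel_right]
    constructor
    · intro x
      rw [PySem.Dict.getD_insert]
      by_cases hx : x = b
      · subst hx; simp
      · rw [if_neg hx, hd x]
        have h1 : List.count x [b] = 0 := by
          rw [List.count_eq_zero]; simp [hx]
        simp [List.count_append, h1]
    · rw [hacc]
      simp only [pvSpecLab, List.reverse_cons, ← List.append_assoc]
      congr 2
      by_cases h0 : pre.count b = 0 <;> simp [h0]

-- ===== VERDICT (by name: the statement is the Claim_ definition above) =====
theorem viewer_axis_labels_spec : Claim_equal_viewer_axis_labels := by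
  intro names _
  unfold Spec_viewer_axis_labels viewer_axis_labels viewer_axis_labels_alt
  rw [pvA_inv names PySem.Dict.empty [] [] (by intro x; simp [PySem.Dict.getD_empty])]
  have hrem : ∀ x, ((names.map pvBase).foldl
      (fun d b => d.insert b (d.getD b 0 + 1)) PySem.Dict.empty).getD x 0
      = ((([] : List String) ++ names.map pvBase).count x : Int) := by
    intro x
    rw [PySem.Dict.getD_foldl_insert_add_one, PySem.Dict.getD_empty]
    simp
  have := (pvB_inv (names.map pvBase) [] _ [] hrem).2
  rw [← List.foldl_reverse] at this
  simp only [this]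
  simp
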